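-- pv_equiv track=rewrite | github.com/howard-branch/ai-dm | tools/parse_srd_monsters.py | _join_wrapped_header
-- ===== SOURCE A (Python) =====
-- from typing import Any, Iterable
--
-- HEADER_PREFIXES = (
--     "Saving Throws", "Skills", "Vulnerabilities", "Resistances",
--     "Immunities", "Gear", "Senses", "Languages", "CR",
-- )
--
-- def _join_wrapped_header(lines: Iterable[str]) -> list[str]:
--     """Join soft-wrapped header lines (Skills/.../CR) into one logical line each."""
--     out: list[str] = []
--     buf = ""
--     for raw in lines:
--         s = raw.strip()
--         if not s:
--             if buf:
--                 out.append(buf)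
--                 buf = ""
--             continue
--         starts_field = any(s.startswith(p + " ") or s == p for p in HEADER_PREFIXES) \
--             or s.startswith("CR ")
--         if starts_field:
--             if buf:
--                 out.append(buf)
--             buf = s
--         else:
--             if buf:
--                 buf += " " + s
--             else:
--                 # Not a header field (e.g. AC/HP/Speed line we don't need
--                 # to keep here, or stray ability row); ignore.
--                 continue
--     if buf:
--         out.append(buf)
--     return out
-- ===== SOURCE B (Python) =====
-- HEADER_PREFIXES = (
--     "Saving Throws", "Skills", "Vulnerabilities", "Resistances",
--     "Immunities", "Gear", "Senses", "Languages", "CR",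
-- )
--
-- def _is_field(s):
--     return any(s.startswith(p + " ") or s == p for p in HEADER_PREFIXES)
--
-- def _blocks(ss):
--     """Partition into maximal runs of non-empty strings (two-pointer scan)."""
--     blocks = []
--     i, n = 0, len(ss)
--     while i < n:
--         if not ss[i]:
--             i += 1
--             continue
--         j = i
--         while j < n and ss[j]:
--             j += 1
--         blocks.append(ss[i:j])
--         i = j
--     return blocks
--
-- def _segments(block):
--     """Within one block: drop lines before the first field start, then join each
--     field line with its continuation lines."""
--     segs = []
--     cur = None
--     for s in block:
--         if _is_field(s):
--             if cur is not None:
--                 segs.append(cur)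
--             cur = s
--         elif cur is not None:
--             cur = cur + " " + s
--     if cur is not None:
--         segs.append(cur)
--     return segs
--
-- def _join_wrapped_header(lines):
--     stripped = [raw.strip() for raw in lines]
--     out = []
--     for block in _blocks(stripped):
--         out.extend(_segments(block))
--     return out
-- ===== Notes on version B (the rewrite author's own statement) =====
-- stated objective: alternative
-- what changed: Replaces A's single-pass mutable (out, buf) state machine with a strip-then-partition pipeline: a two-pointer scan cuts the stripped lines into blank-separated blocks, and a per-block segmentation joins each field-start line with its continuations; the redundant extra 'CR ' check is dropped since 'CR' is already a prefix.
import Mathlib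
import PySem

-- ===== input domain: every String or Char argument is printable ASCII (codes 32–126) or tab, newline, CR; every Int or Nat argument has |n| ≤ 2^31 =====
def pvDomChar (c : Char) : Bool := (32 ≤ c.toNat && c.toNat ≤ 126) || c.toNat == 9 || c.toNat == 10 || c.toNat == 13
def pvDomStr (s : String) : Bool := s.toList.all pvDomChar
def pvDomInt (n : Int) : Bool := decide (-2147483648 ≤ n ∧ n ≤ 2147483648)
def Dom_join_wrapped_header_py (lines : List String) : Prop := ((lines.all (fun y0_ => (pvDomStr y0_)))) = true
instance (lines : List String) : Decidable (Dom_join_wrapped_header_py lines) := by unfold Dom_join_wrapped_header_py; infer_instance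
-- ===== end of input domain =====

-- B restructures A's one-pass buffer state machine into blocks-then-segments (objective: alternative decomposition, same cost).

-- ===== PORT A =====
def HEADER_PREFIXES : List String :=
  ["Saving Throws", "Skills", "Vulnerabilities", "Resistances",
   "Immunities", "Gear", "Senses", "Languages", "CR"]

-- A's loop: state (out, buf), buf = "" means empty buffer
def aLoop : List String → List String → String → List String
  | [], out, buf => if buf ≠ "" then out ++ [buf] else out
  | raw :: rest, out, buf =>
    let s := PySem.Str.strip raw
    if s = "" then
      aLoop rest (if buf ≠ "" then out ++ [buf] else out) ""
    else
      let starts_field :=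
        (HEADER_PREFIXES.any (fun p => PySem.Str.startswith s (p ++ " ") || s == p))
          || PySem.Str.startswith s "CR "
      if starts_field then
        aLoop rest (if buf ≠ "" then out ++ [buf] else out) s
      else
        if buf ≠ "" then aLoop rest out (buf ++ " " ++ s)
        else aLoop rest out buf

def join_wrapped_header_py (lines : List String) : List String :=
  aLoop lines [] ""

-- ===== PORT B =====
def isFieldB (s : String) : Bool :=
  HEADER_PREFIXES.any (fun p => PySem.Str.startswith s (p ++ " ") || s == p)

-- Source B's _blocks: maximal runs of non-empty strings (the inner two-pointer scan is the takeWhile/dropWhile pair)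
def blocksB : List String → List (List String)
  | [] => []
  | s :: rest =>
    if s = "" then blocksB rest
    else (s :: rest.takeWhile (fun t => ¬ t = "")) :: blocksB (rest.dropWhile (fun t => ¬ t = ""))
termination_by ss => ss.length
decreasing_by
  · simp
  · exact Nat.lt_succ_of_le (List.length_dropWhile_le _ _)

-- Source B's _segments loop: accumulator segs, current segment cur (None = no open segment)
def segLoop : List String → List String → Option String → List String
  | [], segs, cur => segs ++ cur.toList
  | s :: rest, segs, cur =>
    if isFieldB s then segLoop rest (segs ++ cur.toList) (some s)
    else
      match cur with
      | some c => segLoop rest segs (some (c ++ " " ++ s))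
      | none => segLoop rest segs none

def segmentsB (block : List String) : List String := segLoop block [] none

def join_wrapped_header_py_alt (lines : List String) : List String :=
  (blocksB (lines.map PySem.Str.strip)).flatMap segmentsB

-- ===== PRECONDITION & SPEC =====
def Spec_join_wrapped_header_py (lines : List String) (out : List String) : Prop := out = join_wrapped_header_py_alt lines
instance (lines : List String) (out : List String) : Decidable (Spec_join_wrapped_header_py lines out) := by unfold Spec_join_wrapped_header_py; infer_instance

-- ===== CLAIM (what is proved, stated in full; the proofs are below) =====
def Claim_equal_join_wrapped_header_py : Prop := ∀ (lines : List String), Dom_join_wrapped_header_py lines → Spec_join_wrapped_header_py lines (join_wrapped_header_py lines)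

-- ===== LEMMAS AND PROOFS =====

-- fused intermediate form of B (proof helper only)
def gFuse : List String → Option String → List String
  | [], cur => cur.toList
  | s :: rest, cur =>
    if s = "" then cur.toList ++ gFuse rest none
    else if isFieldB s then cur.toList ++ gFuse rest (some s)
    else
      match cur with
      | some c => gFuse rest (some (c ++ " " ++ s))
      | none => gFuse rest none

theorem aField_eq_isFieldB (s : String) :
    ((HEADER_PREFIXES.any (fun p => PySem.Str.startswith s (p ++ " ") || s == p))
      || PySem.Str.startswith s "CR ") = isFieldB s := by
  unfold isFieldB
  cases h : PySem.Str.startswith s "CR " with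
  | false => simp
  | true =>
    simp only [Bool.or_true]
    symm
    rw [List.any_eq_true]
    exact ⟨"CR", by simp [HEADER_PREFIXES], by simpa using Or.inl h⟩

-- A's loop equals gFuse on the stripped lines, with out/buf factored out
theorem aLoop_eq_gFuse (lines : List String) :
    ∀ (out : List String) (buf : String),
      aLoop lines out buf
        = out ++ gFuse (lines.map PySem.Str.strip) (if buf = "" then none else some buf) := by
  induction lines with
  | nil =>
    intro out buf
    by_cases h : buf = "" <;> simp [aLoop, gFuse, h]
  | cons raw rest ih =>
    intro out buf
    show aLoop (raw :: rest) out buf = _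
    rw [aLoop]
    simp only [List.map_cons]
    rw [gFuse.eq_def]
    by_cases hs : PySem.Str.strip raw = ""
    · by_cases hb : buf = "" <;>
        simp [hs, hb, ih, List.append_assoc]
    · rw [aField_eq_isFieldB]
      by_cases hf : isFieldB (PySem.Str.strip raw)
      · by_cases hb : buf = "" <;>
          simp [hs, hf, hb, ih, List.append_assoc]
      · by_cases hb : buf = ""
        · simp [hs, hf, hb, ih]
        · simp [hs, hf, hb, ih]

theorem segLoop_acc (block : List String) :
    ∀ (segs : List String) (cur : Option String),
      segLoop block segs cur = segs ++ segLoop block [] cur := by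
  induction block with
  | nil => intro segs cur; simp [segLoop]
  | cons s rest ih =>
    intro segs cur
    rw [segLoop.eq_def, segLoop.eq_def]
    by_cases hf : isFieldB s
    · simp only [hf, if_true]
      rw [ih (segs ++ cur.toList), ih ([] ++ cur.toList)]
      simp [List.append_assoc]
    · cases cur with
      | none => simp only [hf]; exact ih segs none
      | some c =>
        simp only [hf]
        rw [ih segs, ih []]
        simp

def bRun (ss : List String) : List String := (blocksB ss).flatMap segmentsB

-- bRun's takeWhile/dropWhile recurrence
theorem blocksB_dropWhile (rest : List String) :
    blocksB (rest.dropWhile (fun t => ¬ t = ""))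
      = blocksB ((rest.dropWhile (fun t => ¬ t = "")).drop 1) := by
  cases h : rest.dropWhile (fun t => decide ¬ t = "") with
  | nil => rfl
  | cons a t =>
    have hne : rest.dropWhile (fun t => decide ¬ t = "") ≠ [] := by rw [h]; simp
    have ha := List.head_dropWhile_not (fun t => decide ¬ t = "") hne
    simp only [h, List.head_cons] at ha
    have ha' : a = "" := by simpa using ha
    simp [blocksB, ha']

theorem bRun_rec (ss : List String) :
    bRun ss = segLoop (ss.takeWhile (fun t => ¬ t = "")) [] none
                ++ bRun ((ss.dropWhile (fun t => ¬ t = "")).drop 1) := by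
  cases ss with
  | nil => simp [bRun, blocksB, segLoop]
  | cons s rest =>
    by_cases hs : s = ""
    · simp [bRun, blocksB, hs, segLoop]
    · have ht : (s :: rest).takeWhile (fun t => ¬ t = "") = s :: rest.takeWhile (fun t => ¬ t = "") := by
        simp [hs]
      have hd : (s :: rest).dropWhile (fun t => ¬ t = "") = rest.dropWhile (fun t => ¬ t = "") := by
        simp [hs]
      rw [ht, hd]
      unfold bRun
      rw [← blocksB_dropWhile]
      simp only [blocksB, hs, if_false, List.flatMap_cons]
      rfl

theorem segLoop_cons_field {s : String} (rest segs : List String) (cur : Option String)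
    (hf : isFieldB s) :
    segLoop (s :: rest) segs cur = segLoop rest (segs ++ cur.toList) (some s) := by
  rw [segLoop.eq_def]; simp [hf]

theorem segLoop_cons_other_some {s : String} (rest segs : List String) (c : String)
    (hf : ¬ isFieldB s) :
    segLoop (s :: rest) segs (some c) = segLoop rest segs (some (c ++ " " ++ s)) := by
  rw [segLoop.eq_def]; simp [hf]

theorem segLoop_cons_other_none {s : String} (rest segs : List String)
    (hf : ¬ isFieldB s) :
    segLoop (s :: rest) segs none = segLoop rest segs none := by
  rw [segLoop.eq_def]; simp [hf]

theorem gFuse_cons_blank (rest : List String) (cur : Option String) :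
    gFuse ("" :: rest) cur = cur.toList ++ gFuse rest none := by
  rw [gFuse.eq_def]; simp

theorem gFuse_cons_field {s : String} (rest : List String) (cur : Option String)
    (hs : ¬ s = "") (hf : isFieldB s) :
    gFuse (s :: rest) cur = cur.toList ++ gFuse rest (some s) := by
  rw [gFuse.eq_def]; simp [hs, hf]

theorem gFuse_cons_other_some {s : String} (rest : List String) (c : String)
    (hs : ¬ s = "") (hf : ¬ isFieldB s) :
    gFuse (s :: rest) (some c) = gFuse rest (some (c ++ " " ++ s)) := by
  rw [gFuse.eq_def]; simp [hs, hf]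

theorem gFuse_cons_other_none {s : String} (rest : List String)
    (hs : ¬ s = "") (hf : ¬ isFieldB s) :
    gFuse (s :: rest) none = gFuse rest none := by
  rw [gFuse.eq_def]; simp [hs, hf]

theorem gFuse_eq (ss : List String) :
    ∀ (cur : Option String),
      gFuse ss cur = segLoop (ss.takeWhile (fun t => ¬ t = "")) [] cur
                      ++ bRun ((ss.dropWhile (fun t => ¬ t = "")).drop 1) := by
  induction ss with
  | nil => intro cur; simp [gFuse, segLoop, bRun, blocksB]
  | cons s rest ih =>
    intro cur
    by_cases hs : s = ""
    · subst hs
      have htw : (("" :: rest).takeWhile (fun t => ¬ t = "")) = ([] : List String) := by simp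
      have hdw : (("" :: rest).dropWhile (fun t => ¬ t = "")) = "" :: rest := by simp
      rw [gFuse_cons_blank, htw, hdw, ih none, ← bRun_rec rest]
      rw [segLoop.eq_def]
      simp
    · have htw : ((s :: rest).takeWhile (fun t => ¬ t = ""))
          = s :: rest.takeWhile (fun t => ¬ t = "") := by simp [hs]
      have hdw : ((s :: rest).dropWhile (fun t => ¬ t = ""))
          = rest.dropWhile (fun t => ¬ t = "") := by simp [hs]
      rw [htw, hdw]
      by_cases hf : isFieldB s
      · rw [gFuse_cons_field rest cur hs hf, ih (some s),
          segLoop_cons_field _ _ _ hf, List.nil_append, segLoop_acc _ cur.toList]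
        simp [List.append_assoc]
      · cases cur with
        | none =>
          rw [gFuse_cons_other_none rest hs hf, ih none, segLoop_cons_other_none _ _ hf]
        | some c =>
          rw [gFuse_cons_other_some rest c hs hf, ih (some (c ++ " " ++ s)),
            segLoop_cons_other_some _ _ _ hf]

-- ===== VERDICT (by name: the statement is the Claim_ definition above) =====
theorem join_wrapped_header_py_spec : Claim_equal_join_wrapped_header_py := by
  intro lines _
  unfold Spec_join_wrapped_header_py join_wrapped_header_py join_wrapped_header_py_alt
  rw [aLoop_eq_gFuse]
  simp only [List.nil_append, reduceIte]
  rw [gFuse_eq, ← bRun_rec]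
  rfl
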